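-- pv_equiv track=rewrite | github.com/mabobj/China-Equity-Research-Assistant | backend/app/services/data_service/cleaning/announcements.py | _resolve_provider_used
-- ===== SOURCE A (Python) =====
-- from typing import Any, Mapping, Optional, Sequence
--
-- def _resolve_provider_used(
--     provider_used: Optional[str],
--     observed_sources: list[str],
-- ) -> Optional[str]:
--     if provider_used:
--         return provider_used
--     deduped_sources = list(dict.fromkeys(source for source in observed_sources if source))
--     if not deduped_sources:
--         return None
--     if len(deduped_sources) == 1:
--         return deduped_sources[0]
--     return "mixed"
-- ===== SOURCE B (Python) =====
-- from typing import Optional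
--
-- def _resolve_provider_used(
--     provider_used: Optional[str],
--     observed_sources: list[str],
-- ) -> Optional[str]:
--     if provider_used:
--         return provider_used
--     first = None
--     for source in observed_sources:
--         if not source:
--             continue
--         if first is None:
--             first = source
--         elif source != first:
--             return "mixed"
--     return first
-- ===== Notes on version B (the rewrite author's own statement) =====
-- stated objective: simpler
-- what changed: Replaces building an order-preserving deduplicated list and branching on its length with a single short-circuiting pass keeping one sentinel variable, returning 'mixed' the moment a second distinct non-empty source is seen.
import Mathlib
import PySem

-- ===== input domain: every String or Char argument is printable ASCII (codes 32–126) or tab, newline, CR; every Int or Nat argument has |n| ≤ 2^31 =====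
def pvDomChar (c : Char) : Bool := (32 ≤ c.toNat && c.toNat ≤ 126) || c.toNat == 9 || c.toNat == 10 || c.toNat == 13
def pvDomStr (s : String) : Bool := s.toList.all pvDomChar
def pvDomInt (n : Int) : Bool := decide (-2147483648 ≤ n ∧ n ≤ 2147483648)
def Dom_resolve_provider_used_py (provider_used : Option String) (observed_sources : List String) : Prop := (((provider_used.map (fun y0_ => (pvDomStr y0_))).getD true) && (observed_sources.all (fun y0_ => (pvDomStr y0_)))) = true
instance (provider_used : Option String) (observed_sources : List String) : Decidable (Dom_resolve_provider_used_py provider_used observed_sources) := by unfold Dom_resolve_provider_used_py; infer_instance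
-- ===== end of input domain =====

-- B replaces the dedup-list-then-length-check with a single short-circuiting pass
-- over observed_sources keeping one sentinel variable (objective: simpler).


-- ===== PORT A =====
-- `list(dict.fromkeys(source for source in observed_sources if source))`:
-- fold that keeps first occurrence of each non-empty string, in order (exact).
def pvDedupStep (d : List String) (s : String) : List String :=
  if s = "" then d else if d.contains s then d else d ++ [s]

def resolve_provider_used_py (provider_used : Option String) (observed_sources : List String) : Option String :=
  -- `if provider_used:` — truthy iff Some non-empty string
  if (match provider_used with | some p => !(p == "") | none => false) then provider_used
  else
    let deduped_sources := observed_sources.foldl pvDedupStep []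
    if deduped_sources = [] then none
    else if deduped_sources.length = 1 then PySem.List.pyGet? deduped_sources 0
    else some "mixed"

-- ===== PORT B =====
def pvScan : List String → Option String → Option String
  | [], first => first
  | source :: rest, first =>
    if source = "" then pvScan rest first
    else match first with
      | none => pvScan rest (some source)
      | some f => if source ≠ f then some "mixed" else pvScan rest (some f)

def resolve_provider_used_py_alt (provider_used : Option String) (observed_sources : List String) : Option String :=
  if (match provider_used with | some p => !(p == "") | none => false) then provider_used
  else pvScan observed_sources none

-- ===== PRECONDITION & SPEC =====
def Spec_resolve_provider_used_py (provider_used : Option String) (observed_sources : List String) (out : Option String) : Prop := out = resolve_provider_used_py_alt provider_used observed_sources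
instance (provider_used : Option String) (observed_sources : List String) (out : Option String) : Decidable (Spec_resolve_provider_used_py provider_used observed_sources out) := by unfold Spec_resolve_provider_used_py; infer_instance

-- ===== CLAIM (what is proved, stated in full; the proofs are below) =====
def Claim_equal_resolve_provider_used_py : Prop := ∀ (provider_used : Option String) (observed_sources : List String), Dom_resolve_provider_used_py provider_used observed_sources → Spec_resolve_provider_used_py provider_used observed_sources (resolve_provider_used_py provider_used observed_sources)

-- ===== LEMMAS AND PROOFS =====

-- A's answer as a function of the deduped list
def pvAns (d : List String) : Option String :=
  if d = [] then none
  else if d.length = 1 then PySem.List.pyGet? d 0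
  else some "mixed"

theorem pvDedup_len_mono : ∀ (l : List String) (d : List String),
    d.length ≤ (l.foldl pvDedupStep d).length := by
  intro l
  induction l with
  | nil => intro d; simp
  | cons s l ih =>
    intro d
    have h := ih (pvDedupStep d s)
    have : d.length ≤ (pvDedupStep d s).length := by
      unfold pvDedupStep; split_ifs <;> simp
    simpa [List.foldl] using le_trans this h

theorem pvAns_mixed : ∀ (l : List String) (d : List String),
    2 ≤ d.length → pvAns (l.foldl pvDedupStep d) = some "mixed" := by
  intro l d h
  have h2 : 2 ≤ (l.foldl pvDedupStep d).length := le_trans h (pvDedup_len_mono l d)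
  unfold pvAns
  have hne : l.foldl pvDedupStep d ≠ [] := by
    intro he; rw [he] at h2; simp at h2
  have hlen : (l.foldl pvDedupStep d).length ≠ 1 := by omega
  simp [hne, hlen]

theorem pvMain : ∀ (l : List String),
    pvAns (l.foldl pvDedupStep []) = pvScan l none ∧
    ∀ f, pvAns (l.foldl pvDedupStep [f]) = pvScan l (some f) := by
  intro l
  induction l with
  | nil =>
    constructor
    · simp [pvAns, pvScan]
    · intro f
      show pvAns [f] = some f
      unfold pvAns
      simp [PySem.List.pyGet?, PySem.List.pyIdx?]
  | cons s l ih =>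
    constructor
    · by_cases hs : s = ""
      · simpa [List.foldl, pvDedupStep, pvScan, hs] using ih.1
      · simpa [List.foldl, pvDedupStep, pvScan, hs] using ih.2 s
    · intro f
      by_cases hs : s = ""
      · simpa [List.foldl, pvDedupStep, pvScan, hs] using ih.2 f
      · by_cases hf : s = f
        · subst hf
          simpa [List.foldl, pvDedupStep, pvScan, hs] using ih.2 s
        · have hfs : ¬ (f = s) := fun h => hf h.symm
          have : (s :: l).foldl pvDedupStep [f] = l.foldl pvDedupStep [f, s] := by
            simp [List.foldl, pvDedupStep, hs, hf]
          rw [this, pvAns_mixed l [f, s] (by simp)]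
          simp [pvScan, hs, hf]

-- ===== VERDICT (by name: the statement is the Claim_ definition above) =====
theorem resolve_provider_used_py_spec : Claim_equal_resolve_provider_used_py := by
  intro pu obs _
  unfold Spec_resolve_provider_used_py resolve_provider_used_py resolve_provider_used_py_alt
  split_ifs with h
  · rfl
  · exact (pvMain obs).1
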